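-- pv_equiv track=rewrite | github.com/jamin-eisenberg/jotto-solver | main.py | match_number
-- ===== SOURCE A (Python) =====
-- def match_number(guess, answer):
--     correct_letters = 0
--     temp_answer = answer[:]
--     for guess_letter in guess:
--         if guess_letter in temp_answer:
--             temp_answer.remove(guess_letter)
--             correct_letters += 1
--     return correct_letters
-- ===== SOURCE B (Python) =====
-- def match_number(guess, answer):
--     guess_counts = {}
--     for letter in guess:
--         guess_counts[letter] = guess_counts.get(letter, 0) + 1
--     answer_counts = {}
--     for letter in answer:
--         answer_counts[letter] = answer_counts.get(letter, 0) + 1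
--     return sum(min(c, answer_counts.get(letter, 0)) for letter, c in guess_counts.items())
-- ===== Notes on version B (the rewrite author's own statement) =====
-- stated objective: faster
-- what changed: Replaces the per-guess-letter membership scan and in-place removal from a copied answer list with two hash counters built in one pass each, returning the sum of per-letter minimum counts.
import Mathlib
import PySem

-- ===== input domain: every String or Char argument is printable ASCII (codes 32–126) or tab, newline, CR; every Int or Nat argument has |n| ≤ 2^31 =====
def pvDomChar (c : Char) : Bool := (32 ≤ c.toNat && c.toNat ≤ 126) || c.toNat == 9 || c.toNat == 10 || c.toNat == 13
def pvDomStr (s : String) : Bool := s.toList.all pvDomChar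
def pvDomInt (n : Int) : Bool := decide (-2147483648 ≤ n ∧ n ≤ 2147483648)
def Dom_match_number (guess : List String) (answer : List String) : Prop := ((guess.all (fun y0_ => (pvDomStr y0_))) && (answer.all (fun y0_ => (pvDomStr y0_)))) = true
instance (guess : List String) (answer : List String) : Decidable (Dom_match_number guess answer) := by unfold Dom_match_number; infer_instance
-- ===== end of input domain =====

-- B replaces A's per-letter membership scan + removal on a copied answer list by two
-- hash counters and a sum of per-letter minimum counts (asymptotically fewer scans).

-- ===== PORT A =====
-- loop state: (correct_letters, temp_answer); 'x in list' then 'list.remove(x)' — remove?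
-- is some exactly because membership was just checked (the 'none' branch is unreachable).
def match_number (guess : List String) (answer : List String) : Int :=
  (guess.foldl (fun (st : Int × List String) guess_letter =>
      if guess_letter ∈ st.2 then
        match PySem.List.remove? st.2 guess_letter with
        | some t => (st.1 + 1, t)
        | none => st
      else st) (0, answer)).1

-- ===== PORT B =====
def match_number_alt (guess : List String) (answer : List String) : Int :=
  let guess_counts := guess.foldl (fun d letter => d.insert letter (d.getD letter 0 + 1)) PySem.Dict.empty
  let answer_counts := answer.foldl (fun d letter => d.insert letter (d.getD letter 0 + 1)) PySem.Dict.empty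
  (guess_counts.items.map (fun p => min p.2 (answer_counts.getD p.1 0))).sum

-- ===== PRECONDITION & SPEC =====
def Spec_match_number (guess : List String) (answer : List String) (out : Int) : Prop := out = match_number_alt guess answer
instance (guess : List String) (answer : List String) (out : Int) : Decidable (Spec_match_number guess answer out) := by unfold Spec_match_number; infer_instance

-- ===== CLAIM (what is proved, stated in full; the proofs are below) =====
def Claim_equal_match_number : Prop := ∀ (guess : List String) (answer : List String), Dom_match_number guess answer → Spec_match_number guess answer (match_number guess answer)

-- ===== LEMMAS AND PROOFS =====

-- A's loop computes c + |↑g ∩ ↑a| (multiset intersection cardinality), by the greedy step.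
lemma matchA_loop (g : List String) : ∀ (a : List String) (c : Int),
    (g.foldl (fun (st : Int × List String) gl =>
      if gl ∈ st.2 then
        match PySem.List.remove? st.2 gl with
        | some t => (st.1 + 1, t)
        | none => st
      else st) (c, a)).1 = c + ((↑g ∩ ↑a : Multiset String)).card := by
  induction g with
  | nil => intro a c; simp
  | cons x gs ih =>
    intro a c
    simp only [List.foldl_cons]
    by_cases hx : x ∈ a
    · rw [if_pos hx, PySem.List.remove?_eq_some_erase a x hx]
      rw [ih (a.erase x) (c + 1)]
      have hi : ((↑(x :: gs) : Multiset String) ∩ ↑a) = x ::ₘ ((↑gs : Multiset String) ∩ (↑a : Multiset String).erase x) := by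
        rw [← Multiset.cons_coe, Multiset.cons_inter_of_pos _ (by exact_mod_cast hx)]
      rw [hi, Multiset.card_cons, ← Multiset.coe_erase]
      push_cast
      ring
    · rw [if_neg hx, ih a c]
      have hi : ((↑(x :: gs) : Multiset String) ∩ ↑a) = ((↑gs : Multiset String) ∩ ↑a) := by
        rw [← Multiset.cons_coe, Multiset.cons_inter_of_neg _ (by exact_mod_cast hx)]
      rw [hi]

lemma matchA_eq (g a : List String) :
    match_number g a = ((↑g ∩ ↑a : Multiset String)).card := by
  unfold match_number
  rw [matchA_loop g a 0]; ring

-- the sum of per-letter minimum counts over the distinct letters of g is that cardinality.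
lemma sum_min_counts (g a : List String) :
    ∑ k ∈ g.toFinset, min (g.count k) (a.count k) = ((↑g ∩ ↑a : Multiset String)).card := by
  have hsub : (↑g ∩ ↑a : Multiset String).toFinset ⊆ g.toFinset := by
    intro k hk
    simp only [Multiset.mem_toFinset, Multiset.mem_inter, Multiset.mem_coe] at hk
    simpa [List.mem_toFinset] using hk.1
  have hz : ∀ k ∈ g.toFinset, k ∉ (↑g ∩ ↑a : Multiset String).toFinset →
      Multiset.count k (↑g ∩ ↑a : Multiset String) = 0 := by
    intro k _ hk
    rw [Multiset.count_eq_zero]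
    simpa only [Multiset.mem_toFinset] using hk
  calc ∑ k ∈ g.toFinset, min (g.count k) (a.count k)
      = ∑ k ∈ g.toFinset, Multiset.count k (↑g ∩ ↑a : Multiset String) := by
        apply Finset.sum_congr rfl; intro k _; simp
    _ = ∑ k ∈ (↑g ∩ ↑a : Multiset String).toFinset, Multiset.count k (↑g ∩ ↑a : Multiset String) := by
        rw [Finset.sum_subset hsub hz]
    _ = ((↑g ∩ ↑a : Multiset String)).card := Multiset.toFinset_sum_count_eq _

lemma matchB_eq (g a : List String) :
    match_number_alt g a = ((↑g ∩ ↑a : Multiset String)).card := by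
  unfold match_number_alt
  simp only [PySem.Dict.foldl_insert_getD_add_one_eq_counter, PySem.Dict.items_counter,
    List.map_map, Function.comp_def, PySem.Dict.getD_counter]
  have hmap : (PySem.Set.ofList g).map (fun k => min ((List.count k g : Int)) ((List.count k a : Int)))
      = (PySem.Set.ofList g).map (fun k => ((min (List.count k g) (List.count k a) : Nat) : Int)) := by
    apply List.map_congr_left; intro k _; push_cast; rfl
  have hfin : (PySem.Set.ofList g).toFinset = g.toFinset := by
    ext k; simp [PySem.Set.mem_ofList]
  rw [hmap, ← List.sum_toFinset _ (PySem.Set.nodup_ofList g), hfin]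
  rw [← Nat.cast_sum, sum_min_counts]

-- ===== VERDICT (by name: the statement is the Claim_ definition above) =====
theorem match_number_spec : Claim_equal_match_number := by
  intro g a _
  unfold Spec_match_number
  rw [matchA_eq, matchB_eq]
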